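-- pv_equiv track=rewrite | github.com/Kasper-Arfman/pyjacket | pyjacket/ntheory/knapsack/.trash/test_gpt.py | knapsack_solver
-- ===== SOURCE A (Python) =====
-- from itertools import product
--
-- def knapsack_solver(weights, values, bin_capacities):
--     num_items = len(weights)
--     num_bins = len(bin_capacities)
--
--     # Helper function to calculate total value and check constraints.
--     def is_valid_assignment(assignment):
--         bin_weights = [0] * num_bins
--         bin_values = [0] * num_bins
--
--         for item, bin_idx in enumerate(assignment):
--             if bin_idx >= 0:  # Item is assigned to a bin.
--                 bin_weights[bin_idx] += weights[item]
--                 bin_values[bin_idx] += values[item]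
--
--         # Check if any bin exceeds its capacity.
--         if any(bin_weights[b] > bin_capacities[b] for b in range(num_bins)):
--             return False, 0
--
--         # Return the total value of the assignment.
--         return True, sum(bin_values)
--
--     # Generate all possible assignments of items to bins (-1 means not assigned).
--     all_assignments = product(range(-1, num_bins), repeat=num_items)
--
--     # Try each assignment and keep track of the best one.
--     best_value = 0
--     best_assignment = None
--
--     for assignment in all_assignments:
--         valid, total_value = is_valid_assignment(assignment)
--         if valid and total_value > best_value:
--             best_value = total_value
--             best_assignment = assignment
--
--     return best_value, best_assignment
-- ===== SOURCE B (Python) =====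
-- def knapsack_solver(weights, values, bin_capacities):
--     num_bins = len(bin_capacities)
--     n = len(weights)
--     bin_weights = [0] * num_bins
--     bin_values = [0] * num_bins
--     asg = []
--     best = (0, None)
--
--     def rec(i):
--         nonlocal best
--         if i == n:
--             if any(bin_weights[b] > bin_capacities[b] for b in range(num_bins)):
--                 return
--             total_value = sum(bin_values)
--             if total_value > best[0]:
--                 best = (total_value, tuple(asg))
--             return
--         for b in range(-1, num_bins):
--             if b >= 0:
--                 bin_weights[b] += weights[i]
--                 bin_values[b] += values[i]
--             asg.append(b)
--             rec(i + 1)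
--             asg.pop()
--             if b >= 0:
--                 bin_weights[b] -= weights[i]
--                 bin_values[b] -= values[i]
--
--     rec(0)
--     return best
-- ===== Notes on version B (the rewrite author's own statement) =====
-- stated objective: alternative
-- what changed: Replaces the flat itertools.product enumeration with per-assignment from-scratch validity recomputation by a recursive backtracking search over item indices that threads incremental per-bin weight/value accumulators, checking capacity and updating the best only at full-assignment leaves.
import Mathlib
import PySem

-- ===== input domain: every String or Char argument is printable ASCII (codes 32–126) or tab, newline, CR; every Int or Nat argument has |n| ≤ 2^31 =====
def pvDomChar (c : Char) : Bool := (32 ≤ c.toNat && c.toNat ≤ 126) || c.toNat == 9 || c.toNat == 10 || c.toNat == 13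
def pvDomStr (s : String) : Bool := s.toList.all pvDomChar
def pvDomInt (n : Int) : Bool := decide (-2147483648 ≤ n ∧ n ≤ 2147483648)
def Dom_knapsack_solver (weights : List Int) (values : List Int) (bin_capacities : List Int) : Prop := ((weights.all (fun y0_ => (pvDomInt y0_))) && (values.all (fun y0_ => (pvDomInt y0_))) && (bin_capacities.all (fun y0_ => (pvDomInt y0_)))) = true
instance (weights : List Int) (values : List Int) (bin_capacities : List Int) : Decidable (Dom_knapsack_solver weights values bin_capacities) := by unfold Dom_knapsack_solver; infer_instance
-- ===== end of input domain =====

-- B replaces A's flat product enumeration + per-assignment recompute by a backtracking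
-- recursion over item indices threading incremental per-bin accumulators (objective: alternative).

-- ===== PORT A =====
-- the enumerate-loop of is_valid_assignment: item index i, running bin_weights/bin_values
-- (indices are always in range inside Pre_, so getD/set are exact there)
def pvValidLoop (w v : List Int) : List Int → Nat → List Int → List Int → List Int × List Int
  | [], _, bw, bv => (bw, bv)
  | b :: rest, i, bw, bv =>
    if b ≥ 0 then
      pvValidLoop w v rest (i + 1)
        (bw.set b.toNat (bw.getD b.toNat 0 + w.getD i 0))
        (bv.set b.toNat (bv.getD b.toNat 0 + v.getD i 0))
    else pvValidLoop w v rest (i + 1) bw bv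

def pvValid (w v caps : List Int) (asg : List Int) : Bool × Int :=
  let p := pvValidLoop w v asg 0 (List.replicate caps.length 0) (List.replicate caps.length 0)
  if (List.range caps.length).any (fun b => p.1.getD b 0 > caps.getD b 0) then (false, 0)
  else (true, p.2.foldl (· + ·) 0)

-- itertools.product(range(-1, num_bins), repeat=num_items): leftmost component slowest
def pvAll (choices : List Int) : Nat → List (List Int)
  | 0 => [[]]
  | n + 1 => choices.flatMap (fun c => (pvAll choices n).map (fun t => c :: t))

-- the body of A's main loop
def pvStep (w v caps : List Int) (best : Int × Option (List Int)) (asg : List Int) : Int × Option (List Int) :=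
  let r := pvValid w v caps asg
  if r.1 ∧ r.2 > best.1 then (r.2, some asg) else best

def knapsack_solver (weights : List Int) (values : List Int) (bin_capacities : List Int) : Int × Option (List Int) :=
  (pvAll (PySem.List.pyRange (-1) (bin_capacities.length : Int) 1) weights.length).foldl
    (pvStep weights values bin_capacities) (0, none)

-- ===== PORT B =====
-- backtracking over items: m items remain, i is the current item index; bw/bv are the
-- running per-bin weights/values, asg the partial assignment, best the running optimum
def pvBRec (w v caps : List Int) : Nat → Nat → List Int → List Int → List Int →
    Int × Option (List Int) → Int × Option (List Int)
  | 0, _, bw, bv, asg, best =>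
    if (List.range caps.length).any (fun b => bw.getD b 0 > caps.getD b 0) then best
    else
      let tv := bv.foldl (· + ·) 0
      if tv > best.1 then (tv, some asg) else best
  | m + 1, i, bw, bv, asg, best =>
    (PySem.List.pyRange (-1) (caps.length : Int) 1).foldl
      (fun acc b =>
        if b ≥ 0 then
          pvBRec w v caps m (i + 1)
            (bw.set b.toNat (bw.getD b.toNat 0 + w.getD i 0))
            (bv.set b.toNat (bv.getD b.toNat 0 + v.getD i 0))
            (asg ++ [b]) acc
        else pvBRec w v caps m (i + 1) bw bv (asg ++ [b]) acc)
      best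

def knapsack_solver_alt (weights : List Int) (values : List Int) (bin_capacities : List Int) : Int × Option (List Int) :=
  pvBRec weights values bin_capacities weights.length 0
    (List.replicate bin_capacities.length 0) (List.replicate bin_capacities.length 0)
    [] (0, none)

-- ===== PRECONDITION & SPEC =====
-- Pre_ excludes exactly the inputs where A raises IndexError: values shorter than weights
-- while some bin exists (then some assignment puts an item past values' end); both programs raise there.
def Pre_knapsack_solver (weights : List Int) (values : List Int) (bin_capacities : List Int) : Prop :=
  weights.length ≤ values.length ∨ bin_capacities = []
instance (weights : List Int) (values : List Int) (bin_capacities : List Int) : Decidable (Pre_knapsack_solver weights values bin_capacities) := by unfold Pre_knapsack_solver; infer_instance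

def pvWitness_knapsack_solver : List Int × List Int × List Int := ([1, 2], [3, 4], [5])

def Spec_knapsack_solver (weights : List Int) (values : List Int) (bin_capacities : List Int) (out : Int × Option (List Int)) : Prop := out = knapsack_solver_alt weights values bin_capacities
instance (weights : List Int) (values : List Int) (bin_capacities : List Int) (out : Int × Option (List Int)) : Decidable (Spec_knapsack_solver weights values bin_capacities out) := by unfold Spec_knapsack_solver; infer_instance

-- ===== CLAIM (what is proved, stated in full; the proofs are below) =====
def Claim_equal_knapsack_solver : Prop := ∀ (weights : List Int) (values : List Int) (bin_capacities : List Int), Dom_knapsack_solver weights values bin_capacities → Pre_knapsack_solver weights values bin_capacities → Spec_knapsack_solver weights values bin_capacities (knapsack_solver weights values bin_capacities)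

-- ===== LEMMAS AND PROOFS =====

-- splitting the enumerate loop at an append
theorem pvValidLoop_append (w v : List Int) (xs : List Int) : ∀ (ys : List Int) (i : Nat) (bw bv : List Int),
    pvValidLoop w v (xs ++ ys) i bw bv
      = pvValidLoop w v ys (i + xs.length)
          (pvValidLoop w v xs i bw bv).1 (pvValidLoop w v xs i bw bv).2 := by
  induction xs with
  | nil => intro ys i bw bv; simp [pvValidLoop]
  | cons b rest ih =>
      intro ys i bw bv
      simp only [List.cons_append, pvValidLoop, List.length_cons]
      have harith : i + (rest.length + 1) = (i + 1) + rest.length := by omega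
      split <;> rw [ih, harith]

theorem foldl_flatMap_pv {α β γ : Type} (f : β → α → β) (g : γ → List α) (xs : List γ) (init : β) :
    (xs.flatMap g).foldl f init = xs.foldl (fun acc x => (g x).foldl f acc) init := by
  induction xs generalizing init with
  | nil => rfl
  | cons x xs ih => simp only [List.flatMap_cons, List.foldl_append, List.foldl_cons, ih]

-- main invariant: the backtracking recursion equals A's fold over all completions of asg
theorem pvBRec_eq (w v caps : List Int) : ∀ (m : Nat) (asg bw bv : List Int) (best : Int × Option (List Int)),
    pvValidLoop w v asg 0 (List.replicate caps.length 0) (List.replicate caps.length 0) = (bw, bv) →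
    pvBRec w v caps m asg.length bw bv asg best
      = (pvAll (PySem.List.pyRange (-1) (caps.length : Int) 1) m).foldl
          (fun acc tail => pvStep w v caps acc (asg ++ tail)) best := by
  intro m
  induction m with
  | zero =>
      intro asg bw bv best hinv
      simp only [pvAll, List.foldl_cons, List.foldl_nil, pvBRec, pvStep, pvValid,
        List.append_nil, hinv]
      split <;> simp_all
  | succ m ih =>
      intro asg bw bv best hinv
      simp only [pvAll, pvBRec, foldl_flatMap_pv, List.foldl_map]
      apply List.foldl_ext
      intro acc c _
      by_cases hc : c ≥ 0
      · rw [if_pos hc]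
        have hinv' : pvValidLoop w v (asg ++ [c]) 0 (List.replicate caps.length 0)
              (List.replicate caps.length 0)
            = (bw.set c.toNat (bw.getD c.toNat 0 + w.getD asg.length 0),
               bv.set c.toNat (bv.getD c.toNat 0 + v.getD asg.length 0)) := by
          rw [pvValidLoop_append, hinv]
          simp only [pvValidLoop, Nat.zero_add, if_pos hc]
        have := ih (asg ++ [c]) _ _ acc hinv'
        simp only [List.length_append, List.length_cons, List.length_nil, Nat.zero_add] at this
        rw [this]
        apply List.foldl_ext
        intro a t _
        simp [List.append_assoc]
      · rw [if_neg hc]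
        have hinv' : pvValidLoop w v (asg ++ [c]) 0 (List.replicate caps.length 0)
              (List.replicate caps.length 0) = (bw, bv) := by
          rw [pvValidLoop_append, hinv]
          simp only [pvValidLoop, if_neg hc]
        have := ih (asg ++ [c]) _ _ acc hinv'
        simp only [List.length_append, List.length_cons, List.length_nil, Nat.zero_add] at this
        rw [this]
        apply List.foldl_ext
        intro a t _
        simp [List.append_assoc]

-- ===== VERDICT (by name: the statement is the Claim_ definition above) =====
theorem knapsack_solver_spec : Claim_equal_knapsack_solver := by
  intro w v caps _ _
  unfold Spec_knapsack_solver knapsack_solver knapsack_solver_alt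
  have h := pvBRec_eq w v caps w.length [] (List.replicate caps.length 0)
    (List.replicate caps.length 0) (0, none) rfl
  simp only [List.length_nil, List.nil_append] at h
  rw [h]
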